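-- pv_equiv track=rewrite | github.com/Rato0101/RBLX-User-combo-Finder | versions/py files/SOURCERBXuserJoinDateV4 alternative(FAILED EXPERIMENT).py | longest_sequential_run
-- ===== SOURCE A (Python) =====
-- def longest_sequential_run(name):
--     if not name:
--         return 0
--     s = name.lower()
--     best = 1
--     cur = 1
--     for i in range(1, len(s)):
--         a, b = s[i-1], s[i]
--         if a.isalpha() and b.isalpha():
--             diff = ord(b) - ord(a)
--             if diff == 1 or diff == -1:
--                 cur += 1
--             else:
--                 cur = 1
--         elif a.isdigit() and b.isdigit():
--             diff = ord(b) - ord(a)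
--             if diff == 1 or diff == -1:
--                 cur += 1
--             else:
--                 cur = 1
--         else:
--             cur = 1
--         if cur > best:
--             best = cur
--     return best
-- ===== SOURCE B (Python) =====
-- def _continues(a, b):
--     return ((a.isalpha() and b.isalpha()) or (a.isdigit() and b.isdigit())) \
--         and abs(ord(b) - ord(a)) == 1
--
-- def longest_sequential_run(name):
--     if not name:
--         return 0
--     s = name.lower()
--     cont = [_continues(a, b) for a, b in zip(s, s[1:])]
--     breaks = [-1] + [i for i, c in enumerate(cont) if not c] + [len(cont)]
--     return max(b2 - b1 for b1, b2 in zip(breaks, breaks[1:]))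
-- ===== Notes on version B (the rewrite author's own statement) =====
-- stated objective: alternative
-- what changed: Instead of one stateful best/cur scan, B precomputes a boolean continuation flag for each adjacent pair, collects the positions of the breaks (False flags) bracketed by -1 and len, and returns the maximum gap between consecutive break positions.
import Mathlib
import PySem

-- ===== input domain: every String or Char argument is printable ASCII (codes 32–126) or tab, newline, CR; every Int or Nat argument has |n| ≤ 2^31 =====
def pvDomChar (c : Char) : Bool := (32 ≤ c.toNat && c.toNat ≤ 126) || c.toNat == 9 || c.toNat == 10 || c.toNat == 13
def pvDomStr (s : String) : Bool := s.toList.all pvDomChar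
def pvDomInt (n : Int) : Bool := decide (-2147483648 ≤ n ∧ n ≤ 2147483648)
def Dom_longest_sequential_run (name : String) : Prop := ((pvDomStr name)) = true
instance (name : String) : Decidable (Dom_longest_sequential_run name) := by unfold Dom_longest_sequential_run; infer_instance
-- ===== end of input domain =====

-- B replaces A's stateful best/cur scan by a break-position computation: flag each
-- adjacent pair, list the break positions bracketed by -1 and len, return the max gap.

-- ===== PORT A =====
def longest_sequential_run (name : String) : Int :=
  if name = "" then 0
  else
    let s := PySem.Chars.lower name.toList
    -- for i in range(1, len(s)): a, b = s[i-1], s[i]  — the adjacent pairs of s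
    let r := (s.zip s.tail).foldl (fun (st : Int × Int) (p : Char × Char) =>
      let best := st.1
      let cur := st.2
      let a := p.1
      let b := p.2
      let cur :=
        if PySem.Chars.isalpha a && PySem.Chars.isalpha b then
          let diff : Int := (b.toNat : Int) - (a.toNat : Int)
          if diff = 1 ∨ diff = -1 then cur + 1 else 1
        else if PySem.Chars.isdigit a && PySem.Chars.isdigit b then
          let diff : Int := (b.toNat : Int) - (a.toNat : Int)
          if diff = 1 ∨ diff = -1 then cur + 1 else 1
        else 1
      (if cur > best then cur else best, cur)) (1, 1)
    r.1

-- ===== PORT B =====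
def pvContinues (a b : Char) : Bool :=
  ((PySem.Chars.isalpha a && PySem.Chars.isalpha b)
    || (PySem.Chars.isdigit a && PySem.Chars.isdigit b))
  && (((b.toNat : Int) - (a.toNat : Int)).natAbs == 1)

def longest_sequential_run_alt (name : String) : Int :=
  if name = "" then 0
  else
    let s := PySem.Chars.lower name.toList
    let cont := (s.zip s.tail).map (fun p => pvContinues p.1 p.2)
    let breaks : List Int :=
      -1 :: ((PySem.List.enumerate cont 0).filter (fun p => !p.2)).map (fun p => p.1)
         ++ [(cont.length : Int)]
    let gapsL := (breaks.zip breaks.tail).map (fun p => p.2 - p.1)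
    match PySem.List.max? gapsL (fun y => y) with
    | some m => m
    | none => 0   -- unreachable: breaks has at least two elements

-- ===== PRECONDITION & SPEC =====
def Spec_longest_sequential_run (name : String) (out : Int) : Prop := out = longest_sequential_run_alt name
instance (name : String) (out : Int) : Decidable (Spec_longest_sequential_run name out) := by unfold Spec_longest_sequential_run; infer_instance

-- ===== CLAIM (what is proved, stated in full; the proofs are below) =====
def Claim_equal_longest_sequential_run : Prop := ∀ (name : String), Dom_longest_sequential_run name → Spec_longest_sequential_run name (longest_sequential_run name)

-- ===== LEMMAS AND PROOFS =====

-- proof-side reference: A's loop as a fold over the boolean flags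
def pvStepF (st : Int × Int) (c : Bool) : Int × Int :=
  let cur := if c then st.2 + 1 else 1
  (max st.1 cur, cur)

def pvRunFold (flags : List Bool) : Int × Int := flags.foldl pvStepF (1, 1)

def pvFalsePos (flags : List Bool) : List Int :=
  ((PySem.List.enumerate flags 0).filter (fun p => !p.2)).map (fun p => p.1)

def pvGaps : List Int → List Int
  | x :: y :: r => (y - x) :: pvGaps (y :: r)
  | _ => []

def pvMaxD : List Int → Int
  | [] => 0
  | x :: xs => xs.foldl max x

theorem pvGaps_eq_zip (l : List Int) :
    (l.zip l.tail).map (fun p => p.2 - p.1) = pvGaps l := by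
  match l with
  | [] => simp [pvGaps]
  | [x] => simp [pvGaps]
  | x :: y :: r =>
    simp only [List.tail_cons, List.zip_cons_cons, List.map_cons, pvGaps]
    exact congrArg _ (pvGaps_eq_zip (y :: r))

theorem pvFalsePos_concat (flags : List Bool) (c : Bool) :
    pvFalsePos (flags ++ [c]) =
      pvFalsePos flags ++ (if c then [] else [(flags.length : Int)]) := by
  unfold pvFalsePos
  rw [PySem.List.enumerate_append]
  cases c <;>
    simp [PySem.List.enumerate_cons, PySem.List.enumerate_nil, List.filter_append]

theorem pvGetLastD_irrel (x : Int) (l : List Int) (d₁ d₂ : Int) :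
    (x :: l).getLastD d₁ = (x :: l).getLastD d₂ := by
  simp only [List.getLastD_cons]

theorem pvGaps_concat (x : Int) (l : List Int) (m : Int) :
    pvGaps (x :: l ++ [m]) = pvGaps (x :: l) ++ [m - (x :: l).getLastD 0] := by
  induction l generalizing x with
  | nil => simp [pvGaps]
  | cons y t ih =>
    have h := ih y
    rw [List.cons_append] at h
    simp only [List.cons_append, pvGaps]
    rw [h]
    simp only [List.getLastD_cons]

theorem pvMaxD_concat (g : List Int) (x : Int) :
    pvMaxD (g ++ [x]) = if g = [] then x else max (pvMaxD g) x := by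
  cases g with
  | nil => simp [pvMaxD]
  | cons h t => simp [pvMaxD, List.foldl_append]

-- the core invariant of B's break-gap computation against A's scan
theorem pvMain (flags : List Bool) :
    pvRunFold flags =
      (pvMaxD (pvGaps ((-1 :: pvFalsePos flags) ++ [(flags.length : Int)])),
       (flags.length : Int) - (pvFalsePos flags).getLastD (-1))
    ∧ 1 ≤ (pvRunFold flags).1 := by
  induction flags using List.reverseRecOn with
  | nil => simp [pvRunFold, pvFalsePos, PySem.List.enumerate_nil, pvGaps, pvMaxD]
  | append_singleton flags c ih =>
    obtain ⟨heq, hbest⟩ := ih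
    have hrun : pvRunFold (flags ++ [c]) = pvStepF (pvRunFold flags) c := by
      simp [pvRunFold, List.foldl_append]
    have hL : ((-1 : Int) :: pvFalsePos flags).getLastD 0
        = (pvFalsePos flags).getLastD (-1) :=
      (pvGetLastD_irrel (-1) (pvFalsePos flags) 0 (-1)).trans List.getLastD_cons
    have h1 := pvGaps_concat (-1) (pvFalsePos flags) ((flags.length : Int))
    rw [hL] at h1
    set n : Int := (flags.length : Int) with hn
    set L : Int := (pvFalsePos flags).getLastD (-1) with hLdef
    have hbest' : 1 ≤ pvMaxD (pvGaps ((-1 : Int) :: pvFalsePos flags ++ [n])) := by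
      rw [heq] at hbest; exact hbest
    have hlen : ((flags ++ [c]).length : Int) = n + 1 := by
      simp [hn]
    cases c with
    | true =>
      have h2 := pvGaps_concat (-1) (pvFalsePos flags) (n + 1)
      rw [hL] at h2
      rw [hrun, heq, pvFalsePos_concat, hlen]
      simp only [reduceIte, List.append_nil, pvStepF, ← hn]
      refine ⟨?_, le_trans hbest' (le_max_left _ _)⟩
      simp only [Prod.mk.injEq]
      refine ⟨?_, by omega⟩
      rw [h1, h2, pvMaxD_concat, pvMaxD_concat]
      split_ifs with hg
      · omega
      · omega
    | false =>
      have hlast : (((-1 : Int) :: pvFalsePos flags) ++ [n]).getLastD 0 = n :=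
        List.getLastD_concat
      have h2 := pvGaps_concat (-1) (pvFalsePos flags ++ [n]) (n + 1)
      rw [show ((-1 : Int) :: (pvFalsePos flags ++ [n])) = ((-1 : Int) :: pvFalsePos flags) ++ [n] by simp] at h2
      rw [hlast] at h2
      rw [hrun, heq, pvFalsePos_concat, hlen]
      simp only [pvStepF, Bool.false_eq_true, if_false, ← hn]
      refine ⟨?_, le_trans hbest' (le_max_left _ _)⟩
      simp only [Prod.mk.injEq]
      simp only [List.cons_append] at h1 h2 ⊢
      constructor
      · rw [h2, pvMaxD_concat, if_neg (by rw [h1]; simp), h1]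
        omega
      · rw [List.getLastD_concat]
        omega

-- A's per-pair step equals the flag step on pvContinues
theorem pvStep_eq (st : Int × Int) (a b : Char) :
    (let best := st.1
     let cur := st.2
     let cur :=
       if PySem.Chars.isalpha a && PySem.Chars.isalpha b then
         let diff : Int := (b.toNat : Int) - (a.toNat : Int)
         if diff = 1 ∨ diff = -1 then cur + 1 else 1
       else if PySem.Chars.isdigit a && PySem.Chars.isdigit b then
         let diff : Int := (b.toNat : Int) - (a.toNat : Int)
         if diff = 1 ∨ diff = -1 then cur + 1 else 1
       else 1
     ((if cur > best then cur else best, cur) : Int × Int)) = pvStepF st (pvContinues a b) := by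
  have hcur : (if PySem.Chars.isalpha a && PySem.Chars.isalpha b then
         (if ((b.toNat : Int) - (a.toNat : Int)) = 1 ∨ ((b.toNat : Int) - (a.toNat : Int)) = -1
          then st.2 + 1 else 1)
       else if PySem.Chars.isdigit a && PySem.Chars.isdigit b then
         (if ((b.toNat : Int) - (a.toNat : Int)) = 1 ∨ ((b.toNat : Int) - (a.toNat : Int)) = -1
          then st.2 + 1 else 1)
       else (1 : Int))
      = (if pvContinues a b then st.2 + 1 else 1) := by
    unfold pvContinues
    by_cases hd : ((b.toNat : Int) - (a.toNat : Int)) = 1 ∨ ((b.toNat : Int) - (a.toNat : Int)) = -1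
    · have hn1 : ((((b.toNat : Int) - (a.toNat : Int)).natAbs == 1) : Bool) = true := by
        simp only [beq_iff_eq]; omega
      rw [hn1]
      by_cases hA : (PySem.Chars.isalpha a && PySem.Chars.isalpha b) = true
      · rw [hA, if_pos hd]
        simp
      · rw [Bool.not_eq_true] at hA
        rw [hA]
        simp only [Bool.false_eq_true, if_false, Bool.false_or]
        by_cases hD : (PySem.Chars.isdigit a && PySem.Chars.isdigit b) = true
        · rw [hD, if_pos hd]
          simp
        · rw [Bool.not_eq_true] at hD
          rw [hD]
          simp
    · have hn0 : ((((b.toNat : Int) - (a.toNat : Int)).natAbs == 1) : Bool) = false := by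
        simp only [beq_eq_false_iff_ne, ne_eq]; omega
      rw [hn0]
      by_cases hA : (PySem.Chars.isalpha a && PySem.Chars.isalpha b) = true
      · rw [hA, if_neg hd]
        simp
      · rw [Bool.not_eq_true] at hA
        rw [hA]
        simp only [Bool.false_eq_true, if_false, Bool.false_or]
        by_cases hD : (PySem.Chars.isdigit a && PySem.Chars.isdigit b) = true
        · rw [hD, if_neg hd]
          simp
        · rw [Bool.not_eq_true] at hD
          rw [hD]
          simp
  simp only [pvStepF]
  rw [hcur]
  rw [Prod.mk.injEq]
  refine ⟨?_, rfl⟩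
  rw [max_def]
  split_ifs <;> omega

theorem pvFoldA (s : List Char) :
    (s.zip s.tail).foldl (fun (st : Int × Int) (p : Char × Char) =>
      let best := st.1
      let cur := st.2
      let a := p.1
      let b := p.2
      let cur :=
        if PySem.Chars.isalpha a && PySem.Chars.isalpha b then
          let diff : Int := (b.toNat : Int) - (a.toNat : Int)
          if diff = 1 ∨ diff = -1 then cur + 1 else 1
        else if PySem.Chars.isdigit a && PySem.Chars.isdigit b then
          let diff : Int := (b.toNat : Int) - (a.toNat : Int)
          if diff = 1 ∨ diff = -1 then cur + 1 else 1
        else 1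
      (if cur > best then cur else best, cur)) (1, 1)
    = pvRunFold ((s.zip s.tail).map (fun p => pvContinues p.1 p.2)) := by
  unfold pvRunFold
  rw [List.foldl_map]
  congr 1
  funext st p
  exact pvStep_eq st p.1 p.2

theorem pvAltMax (x y : Int) (t : List Int) :
    (match PySem.List.max?
        (((x :: t ++ [y]).zip (x :: t ++ [y]).tail).map (fun p => p.2 - p.1)) (fun y => y) with
     | some m => m
     | none => 0) = pvMaxD (pvGaps (x :: t ++ [y])) := by
  rw [pvGaps_eq_zip]
  have hne : pvGaps (x :: t ++ [y]) ≠ [] := by rw [pvGaps_concat]; simp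
  cases hg : pvGaps (x :: t ++ [y]) with
  | nil => exact absurd hg hne
  | cons g0 gr =>
    rw [PySem.List.max?_id_cons]
    simp [pvMaxD]

-- ===== VERDICT (by name: the statement is the Claim_ definition above) =====
theorem longest_sequential_run_spec : Claim_equal_longest_sequential_run := by
  intro name _
  unfold Spec_longest_sequential_run longest_sequential_run longest_sequential_run_alt
  by_cases h : name = ""
  · simp [h]
  · simp only [if_neg h]
    set s := PySem.Chars.lower name.toList with hs
    set flags := (s.zip s.tail).map (fun p => pvContinues p.1 p.2) with hflags
    have hA := pvFoldA s
    rw [← hflags] at hA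
    rw [hA, (pvMain flags).1]
    have halt := pvAltMax (-1) ((flags.length : Int)) (pvFalsePos flags)
    unfold pvFalsePos at halt
    rw [halt]
    unfold pvFalsePos
    rfl
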